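-- pv_equiv track=rewrite | github.com/inesouazene/holbertonschool-Markdown2HTML | markdown2html.py | convert_markdown_paragraph_to_html
-- ===== SOURCE A (Python) =====
-- def convert_markdown_paragraph_to_html(lines):
--     """
--     Convert Markdown paragraphs to HTML.
--
--     Args:
--         lines (list): List of lines from the Markdown file.
--
--     Returns:
--         list: List of converted lines with HTML paragraphs.
--     """
--     html_lines = []
--     in_paragraph = False
--
--     for line in lines:
--         stripped_line = line.strip()
--
--         # If the line is not empty and not a list or heading
--         if stripped_line and not stripped_line.startswith(("#", "-", "*")):
--             if not in_paragraph:
--                 # Start a new paragraph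
--                 html_lines.append("<p>\n")
--                 in_paragraph = True
--             # Add the line to the paragraph
--             html_lines.append(f"    {stripped_line}<br/>\n")
--         else:
--             if in_paragraph:
--                 # Close the current paragraph / # Remove the last <br/>
--                 html_lines[-1] = html_lines[-1].replace("<br/>\n", "\n")
--                 html_lines.append("</p>\n")
--                 in_paragraph = False
--             # Add the line as is
--             html_lines.append(line)
--
--     # Close the last paragraph if still open
--     if in_paragraph:
--         # Remove the last <br/>
--         html_lines[-1] = html_lines[-1].replace("<br/>\n", "\n")
--         html_lines.append("</p>\n")
--
--     return html_lines
-- ===== SOURCE B (Python) =====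
-- def _flush(html, buf):
--     """Emit one buffered paragraph block (no-op on an empty buffer)."""
--     if not buf:
--         return html
--     body = [f"    {s}<br/>\n" for s in buf[:-1]] + [f"    {buf[-1]}\n"]
--     return html + ["<p>\n"] + body + ["</p>\n"]
--
--
-- def convert_markdown_paragraph_to_html(lines):
--     """Group paragraph lines in a buffer, emit each block in one go."""
--     html = []
--     buf = []
--     for line in lines:
--         stripped = line.strip()
--         if stripped and not stripped.startswith(("#", "-", "*")):
--             buf.append(stripped)
--         else:
--             html = _flush(html, buf)
--             buf = []
--             html.append(line)
--     return _flush(html, buf)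
-- ===== Notes on version B (the rewrite author's own statement) =====
-- stated objective: simpler
-- what changed: Replaces A's retroactive html_lines[-1] string-replace mutation and in_paragraph flag by a group-then-emit decomposition: paragraph lines are collected in a buffer and each block is emitted in one flush, with the last buffered line rendered directly without a '<br/>' tag.
import Mathlib
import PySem

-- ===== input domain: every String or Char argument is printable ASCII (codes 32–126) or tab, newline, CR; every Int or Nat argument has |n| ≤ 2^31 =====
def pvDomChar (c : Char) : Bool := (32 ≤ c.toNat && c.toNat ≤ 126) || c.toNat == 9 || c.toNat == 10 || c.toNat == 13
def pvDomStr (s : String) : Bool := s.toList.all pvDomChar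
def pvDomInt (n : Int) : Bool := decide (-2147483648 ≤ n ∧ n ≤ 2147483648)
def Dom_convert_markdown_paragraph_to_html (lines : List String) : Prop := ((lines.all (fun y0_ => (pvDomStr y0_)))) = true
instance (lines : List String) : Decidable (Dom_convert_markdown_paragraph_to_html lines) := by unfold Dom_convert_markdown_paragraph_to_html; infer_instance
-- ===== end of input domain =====

-- B rewrites A's retroactive html_lines[-1] replace-mutation as a group-then-emit pass over a paragraph buffer (objective: simpler).

-- shared helpers: both Pythons contain these identical expressions
-- `stripped_line and not stripped_line.startswith(("#", "-", "*"))`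
def pvParaLine (s : String) : Bool :=
  !s.toList.isEmpty && !(PySem.Str.startswith s "#" || PySem.Str.startswith s "-" || PySem.Str.startswith s "*")
-- f"    {s}{suffix}"  (string concatenation, done on the char-list level so the kernel can unfold it)
def pvTag (s : String) (suffix : String) : String := String.ofList ("    ".toList ++ s.toList ++ suffix.toList)

-- ===== PORT A =====
-- close an open paragraph: html_lines[-1] = html_lines[-1].replace("<br/>\n", "\n"); html_lines.append("</p>\n")
-- (html_lines is nonempty whenever in_paragraph is True, so html_lines[-1] is its last element)
def pvCloseA (html : List String) : List String :=
  html.dropLast ++ [PySem.Str.replace html.getLast! "<br/>\n" "\n", "</p>\n"]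

-- loop body: state = (html_lines, in_paragraph)
def pvStepA (st : List String × Bool) (line : String) : List String × Bool :=
  let stripped_line := PySem.Str.strip line
  if pvParaLine stripped_line then
    ((if st.2 then st.1 else st.1 ++ ["<p>\n"]) ++ [pvTag stripped_line "<br/>\n"], true)
  else
    ((if st.2 then pvCloseA st.1 else st.1) ++ [line], false)

def convert_markdown_paragraph_to_html (lines : List String) : List String :=
  let st := lines.foldl pvStepA ([], false)
  if st.2 then pvCloseA st.1 else st.1

-- ===== PORT B =====
-- _flush: buf[:-1] is buf.dropLast, buf[-1] is buf.getLast! (guarded by `if not buf`)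
def pvFlush (html : List String) (buf : List String) : List String :=
  if buf.isEmpty then html
  else html ++ ["<p>\n"] ++ (buf.dropLast.map (fun s => pvTag s "<br/>\n") ++ [pvTag buf.getLast! "\n"]) ++ ["</p>\n"]

-- loop body: state = (html, buf)
def pvStepB (st : List String × List String) (line : String) : List String × List String :=
  let stripped := PySem.Str.strip line
  if pvParaLine stripped then (st.1, st.2 ++ [stripped])
  else (pvFlush st.1 st.2 ++ [line], [])

def convert_markdown_paragraph_to_html_alt (lines : List String) : List String :=
  let st := lines.foldl pvStepB ([], [])
  pvFlush st.1 st.2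

-- ===== PRECONDITION & SPEC =====
-- Pre_ excludes inputs with a PARAGRAPH line whose stripped text already contains the literal substring "<br/>\n"
-- (possible only via an embedded newline, i.e. never a genuine line of a split file): when such a line closes a
-- paragraph, A's closing replace also rewrites that user text while B keeps it, and neither behaviour is more
-- specified than the other on such a degenerate "line".
def Pre_convert_markdown_paragraph_to_html (lines : List String) : Prop :=
  ∀ line ∈ lines, pvParaLine (PySem.Str.strip line) = true →
    PySem.Str.isIn "<br/>\n" (PySem.Str.strip line) = false
instance (lines : List String) : Decidable (Pre_convert_markdown_paragraph_to_html lines) := by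
  unfold Pre_convert_markdown_paragraph_to_html; infer_instance

def pvWitness_convert_markdown_paragraph_to_html : List String :=
  ["# Title", "", "Hello there,", "world.", "", "- item"]

def Spec_convert_markdown_paragraph_to_html (lines : List String) (out : List String) : Prop := out = convert_markdown_paragraph_to_html_alt lines
instance (lines : List String) (out : List String) : Decidable (Spec_convert_markdown_paragraph_to_html lines out) := by unfold Spec_convert_markdown_paragraph_to_html; infer_instance

-- ===== CLAIM (what is proved, stated in full; the proofs are below) =====
def Claim_equal_convert_markdown_paragraph_to_html : Prop := ∀ (lines : List String), Dom_convert_markdown_paragraph_to_html lines → Pre_convert_markdown_paragraph_to_html lines → Spec_convert_markdown_paragraph_to_html lines (convert_markdown_paragraph_to_html lines)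

-- ===== LEMMAS AND PROOFS =====

-- the pattern "<br/>\n" as a char-list literal
def pvPat : List Char := ['<', 'b', 'r', '/', '>', '\n']

lemma pvPat_eq : "<br/>\n".toList = pvPat := by decide

-- replace.go on the empty string returns the reversed accumulator
lemma pvGo_nil (old new : List Char) (fuel : Nat) (acc : List Char) :
    PySem.Chars.replace.go old new fuel [] acc = acc.reverse := by
  cases fuel <;> simp [PySem.Chars.replace.go]

-- replace.go on u ++ old, when old occurs nowhere before the end, rewrites exactly that final occurrence
lemma pvGo_end (old new : List Char) (hold : old ≠ []) :
    ∀ (u : List Char) (fuel : Nat) (acc : List Char), (u ++ old).length ≤ fuel →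
      (∀ j, j < u.length → ¬ old <+: (u ++ old).drop j) →
      PySem.Chars.replace.go old new fuel (u ++ old) acc = acc.reverse ++ u ++ new := by
  intro u
  induction u with
  | nil =>
    intro fuel acc hfuel _
    simp only [List.nil_append] at *
    obtain ⟨f, rfl⟩ : ∃ f, fuel = f + 1 := by
      cases fuel with
      | zero => simp at hfuel; exact absurd hfuel hold
      | succ f => exact ⟨f, rfl⟩
    obtain ⟨c, t, rfl⟩ : ∃ c t, old = c :: t := by
      cases old with | nil => exact absurd rfl hold | cons c t => exact ⟨c, t, rfl⟩
    simp [PySem.Chars.replace.go, List.isPrefixOf_iff_prefix, pvGo_nil]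
  | cons c u' ih =>
    intro fuel acc hfuel hnocc
    obtain ⟨f, rfl⟩ : ∃ f, fuel = f + 1 := by
      cases fuel with
      | zero => simp at hfuel
      | succ f => exact ⟨f, rfl⟩
    simp only [List.cons_append, PySem.Chars.replace.go, List.isPrefixOf_iff_prefix]
    rw [if_neg (show ¬ old <+: c :: (u' ++ old) from fun h => hnocc 0 (by simp) (by simpa using h))]
    have := ih f (c :: acc) (by simp at hfuel ⊢; omega)
      (fun j hj => by simpa using hnocc (j + 1) (by simp; omega))
    simpa using this

-- Chars.replace on u ++ pvPat, pattern occurring only at the end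
lemma pvReplace_end (new u : List Char)
    (hnocc : ∀ j, j < u.length → ¬ pvPat <+: (u ++ pvPat).drop j) :
    PySem.Chars.replace (u ++ pvPat) pvPat new = u ++ new := by
  unfold PySem.Chars.replace
  rw [if_neg (by simp [pvPat])]
  simpa using pvGo_end pvPat new (by simp [pvPat]) u (u ++ pvPat).length [] le_rfl hnocc

-- pvPat has no proper self-overlap
lemma pvPat_no_overlap : ∀ m, m < 6 → 0 < m → pvPat.drop m ≠ pvPat.take (pvPat.length - m) := by decide

-- if the stripped text does not contain "<br/>\n", the only occurrence of it in "    " ++ s ++ "<br/>\n" is the final one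
lemma pvNo_occ (s : List Char) (hs : ¬ pvPat <:+: s) :
    ∀ j, j < ("    ".toList ++ s).length → ¬ pvPat <+: (("    ".toList ++ s) ++ pvPat).drop j := by
  intro j hj hpre
  rcases Nat.lt_or_ge j 4 with h4 | h4
  · rw [List.append_assoc, List.drop_append_of_le_length (by simp; omega)] at hpre
    interval_cases j <;> simpa [pvPat, List.cons_prefix_cons] using hpre
  · have hlen : ("    ".toList ++ s).length = 4 + s.length := by simp; omega
    have hi : j - 4 < s.length := by omega
    have hdrop : (("    ".toList ++ s) ++ pvPat).drop j = s.drop (j - 4) ++ pvPat := by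
      rw [List.append_assoc, show j = "    ".toList.length + (j - 4) by simp; omega,
        List.drop_length_add_append, List.drop_append_of_le_length (by omega)]
      simp
    rw [hdrop] at hpre
    obtain ⟨q, hq⟩ := hpre
    set t := s.drop (j - 4) with ht
    have htlen : 0 < t.length := by simp [ht]; omega
    rcases Nat.lt_or_ge t.length 6 with hm | hm
    · -- small remainder: pvPat would overlap itself
      have hlt : t.length ≤ pvPat.length := by simp [pvPat]; omega
      have h1 : pvPat.drop t.length ++ q = pvPat := by
        have := congrArg (List.drop t.length) hq
        rwa [List.drop_append_of_le_length hlt, List.drop_left] at this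
      have h2 := List.prefix_iff_eq_take.mp ⟨q, h1⟩
      rw [show (pvPat.drop t.length).length = pvPat.length - t.length from by simp] at h2
      exact pvPat_no_overlap t.length (by simpa [pvPat] using hm) htlen h2
    · -- long remainder: pvPat is a prefix of t, hence an infix of s
      have hp : pvPat <+: t := by
        have := congrArg (List.take pvPat.length) hq
        rw [List.take_left, List.take_append_of_le_length (by simpa [pvPat] using hm)] at this
        exact this ▸ List.take_prefix _ _
      obtain ⟨r, hr⟩ := hp
      exact hs ⟨s.take (j - 4), r, by rw [List.append_assoc, hr, ht, List.take_append_drop]⟩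

-- the closing replace on a tagged line rewrites exactly the tag
lemma pvReplace_tag (s : String) (hs : PySem.Str.isIn "<br/>\n" s = false) :
    PySem.Str.replace (pvTag s "<br/>\n") "<br/>\n" "\n" = pvTag s "\n" := by
  have hinf : ¬ pvPat <:+: s.toList := by
    have h : PySem.Chars.isIn "<br/>\n".toList s.toList = false := by
      rw [← PySem.Str.isIn_eq]; exact hs
    rw [pvPat_eq] at h
    exact (PySem.Chars.isIn_eq_false_iff _ _).mp h
  apply String.toList_inj.mp
  rw [PySem.Str.toList_replace]
  simp only [pvTag, String.toList_ofList, pvPat_eq]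
  rw [pvReplace_end "\n".toList ("    ".toList ++ s.toList) (pvNo_occ s.toList hinf)]

-- the loop invariant tying A's (html_lines, in_paragraph) to B's (html, buf)
def pvInv (a : List String × Bool) (b : List String × List String) : Prop :=
  (a.2 = false → b.2 = [] ∧ a.1 = b.1) ∧
  (a.2 = true → b.2 ≠ [] ∧ (∀ s ∈ b.2, PySem.Str.isIn "<br/>\n" s = false) ∧
    a.1 = b.1 ++ ["<p>\n"] ++ b.2.map (fun s => pvTag s "<br/>\n"))

-- under the invariant, A's paragraph close equals B's flush
lemma pvClose_eq_flush (a : List String × Bool) (b : List String × List String) (h : pvInv a b) :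
    (if a.2 then pvCloseA a.1 else a.1) = pvFlush b.1 b.2 := by
  cases hb : a.2 with
  | false =>
    obtain ⟨hbuf, hhtml⟩ := h.1 hb
    simp [pvFlush, hbuf, hhtml]
  | true =>
    obtain ⟨hne, hoks, hhtml⟩ := h.2 hb
    obtain ⟨L, x, hbx⟩ := (List.eq_nil_or_concat b.2).resolve_left hne
    rw [List.concat_eq_append] at hbx
    have hok : PySem.Str.isIn "<br/>\n" x = false := hoks x (by rw [hbx]; simp)
    rw [if_pos rfl, pvCloseA, pvFlush, hhtml, hbx]
    rw [show b.1 ++ ["<p>\n"] ++ (L ++ [x]).map (fun s => pvTag s "<br/>\n")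
        = (b.1 ++ ["<p>\n"] ++ L.map (fun s => pvTag s "<br/>\n")) ++ [pvTag x "<br/>\n"] by simp]
    rw [List.dropLast_concat]
    simp only [List.getLast!_eq_getLast?_getD, List.getLast?_append, List.getLast?_singleton,
      Option.some_or, String.default_eq, Option.getD_some]
    rw [pvReplace_tag x hok]
    simp

-- one loop step preserves the invariant
lemma pvStep_inv (a : List String × Bool) (b : List String × List String) (line : String)
    (hline : pvParaLine (PySem.Str.strip line) = true → PySem.Str.isIn "<br/>\n" (PySem.Str.strip line) = false)
    (h : pvInv a b) : pvInv (pvStepA a line) (pvStepB b line) := by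
  obtain ⟨ah, ab⟩ := a
  obtain ⟨bh, bb⟩ := b
  have hflush := pvClose_eq_flush (ah, ab) (bh, bb) h
  unfold pvStepA pvStepB
  by_cases hp : pvParaLine (PySem.Str.strip line) = true
  · rw [if_pos hp, if_pos hp]
    refine ⟨fun hf => by simp at hf, fun _ => ?_⟩
    refine ⟨by simp, fun s hsmem => ?_, ?_⟩
    · rcases List.mem_append.mp hsmem with hs | hs
      · cases hA : ab with
        | true => exact (h.2 hA).2.1 s hs
        | false => rw [(h.1 hA).1] at hs; simp at hs
      · rw [List.mem_singleton.mp hs]; exact hline hp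
    · cases hA : ab with
      | true =>
        obtain ⟨_, _, hhtml⟩ := h.2 hA
        simp only at hhtml
        simp [hhtml]
      | false =>
        obtain ⟨hbuf, hhtml⟩ := h.1 hA
        simp only at hhtml hbuf
        simp [hhtml, hbuf]
  · rw [if_neg hp, if_neg hp]
    refine ⟨fun _ => ⟨rfl, ?_⟩, fun ht => by simp at ht⟩
    simp only at hflush
    rw [hflush]

-- the invariant holds after folding any ok list of lines
lemma pvFold_inv (lines : List String) :
    ∀ (a : List String × Bool) (b : List String × List String),
      (∀ l ∈ lines, pvParaLine (PySem.Str.strip l) = true →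
        PySem.Str.isIn "<br/>\n" (PySem.Str.strip l) = false) → pvInv a b →
      pvInv (lines.foldl pvStepA a) (lines.foldl pvStepB b) := by
  induction lines with
  | nil => intro a b _ h; exact h
  | cons l ls ih =>
    intro a b hok h
    simp only [List.foldl_cons]
    exact ih _ _ (fun x hx => hok x (by simp [hx]))
      (pvStep_inv a b l (hok l (by simp)) h)

-- ===== VERDICT (by name: the statement is the Claim_ definition above) =====
theorem convert_markdown_paragraph_to_html_spec : Claim_equal_convert_markdown_paragraph_to_html := by
  intro lines _ hpre
  unfold Spec_convert_markdown_paragraph_to_html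
  unfold convert_markdown_paragraph_to_html convert_markdown_paragraph_to_html_alt
  exact pvClose_eq_flush _ _ (pvFold_inv lines ([], false) ([], []) hpre
    ⟨fun _ => ⟨rfl, rfl⟩, fun h => by simp at h⟩)
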